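-- pv_equiv track=rewrite | github.com/Tomasinjo/orca-energy-ha | development_resources/dump_all/orca_api.py | generate_uri
-- ===== SOURCE A (Python) =====
-- def generate_uri(tags: list) -> list:
--     params = ''
--     count = 0
--     uris = []
--     for tag in tags:
--         count += 1
--         params += f'&t{count}={tag}'
--         if count >= 120:
--             uris.append(f'/cgi/readTags?client=OrcaTouch1172&n={count}{params}')
--             params = ''
--             count = 0
--     uris.append(f'/cgi/readTags?client=OrcaTouch1172&n={count}{params}')
--     return uris
-- ===== SOURCE B (Python) =====
-- def generate_uri(tags: list) -> list:
--     uris = []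
--     rem = tags
--     while len(rem) >= 120:
--         chunk, rem = rem[:120], rem[120:]
--         params = ''.join(f'&t{i}={t}' for i, t in enumerate(chunk, 1))
--         uris.append(f'/cgi/readTags?client=OrcaTouch1172&n=120{params}')
--     params = ''.join(f'&t{i}={t}' for i, t in enumerate(rem, 1))
--     uris.append(f'/cgi/readTags?client=OrcaTouch1172&n={len(rem)}{params}')
--     return uris
-- ===== Notes on version B (the rewrite author's own statement) =====
-- stated objective: simpler
-- what changed: A threads a params-string/counter/uris state machine through a per-element loop with an in-loop flush at 120; B slices the list into 120-element chunks in a while loop, joining each chunk's params in one expression and appending the (possibly empty) remainder unconditionally.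
import Mathlib
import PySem

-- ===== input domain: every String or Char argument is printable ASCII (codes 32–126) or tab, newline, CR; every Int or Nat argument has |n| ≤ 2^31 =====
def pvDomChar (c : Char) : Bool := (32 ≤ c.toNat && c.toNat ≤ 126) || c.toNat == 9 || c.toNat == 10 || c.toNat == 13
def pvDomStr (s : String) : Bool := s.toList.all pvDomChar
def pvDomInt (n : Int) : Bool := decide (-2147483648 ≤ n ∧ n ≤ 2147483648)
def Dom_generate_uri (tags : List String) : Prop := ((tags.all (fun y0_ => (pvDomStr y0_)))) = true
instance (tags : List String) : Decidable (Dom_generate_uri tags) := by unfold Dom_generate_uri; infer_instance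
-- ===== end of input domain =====

-- B slices the tag list into 120-element chunks in a while loop (join per chunk) instead of A's per-element params/counter state machine; same output, plainer decomposition.

-- ===== PORT A =====
-- the body of A's for-loop over tags; state = (params, count, uris)
def pvStepA (st : String × Int × List String) (tag : String) : String × Int × List String :=
  let count := st.2.1 + 1
  let params := st.1 ++ "&t" ++ PySem.Int.toStr count ++ "=" ++ tag
  if 120 ≤ count then
    ("", 0, st.2.2 ++ ["/cgi/readTags?client=OrcaTouch1172&n=" ++ PySem.Int.toStr count ++ params])
  else (params, count, st.2.2)

def generate_uri (tags : List String) : List String :=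
  let st := tags.foldl pvStepA ("", 0, [])
  st.2.2 ++ ["/cgi/readTags?client=OrcaTouch1172&n=" ++ PySem.Int.toStr st.2.1 ++ st.1]

-- ===== PORT B =====
-- ''.join(f'&t{i}={t}' for i, t in enumerate(chunk, 1))
def pvParams (chunk : List String) : String :=
  PySem.Str.join "" ((PySem.List.enumerate chunk 1).map
    (fun it => "&t" ++ PySem.Int.toStr it.1 ++ "=" ++ it.2))

-- B's while-loop: rem is what is left to chunk, uris the accumulator
def pvGo (rem : List String) (uris : List String) : List String :=
  if _h : 120 ≤ rem.length then
    pvGo (PySem.List.slice rem (some 120) none)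
      (uris ++ ["/cgi/readTags?client=OrcaTouch1172&n=120" ++
                 pvParams (PySem.List.slice rem none (some 120))])
  else
    uris ++ ["/cgi/readTags?client=OrcaTouch1172&n=" ++ PySem.Int.toStr rem.length ++ pvParams rem]
termination_by rem.length
decreasing_by
  rw [PySem.List.slice_from rem (a := 120) (by norm_num)]
  simp only [List.length_drop]
  omega

def generate_uri_alt (tags : List String) : List String := pvGo tags []

-- ===== PRECONDITION & SPEC =====
def Spec_generate_uri (tags : List String) (out : List String) : Prop := out = generate_uri_alt tags
instance (tags : List String) (out : List String) : Decidable (Spec_generate_uri tags out) := by unfold Spec_generate_uri; infer_instance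

-- ===== CLAIM (what is proved, stated in full; the proofs are below) =====
def Claim_equal_generate_uri : Prop := ∀ (tags : List String), Dom_generate_uri tags → Spec_generate_uri tags (generate_uri tags)

-- ===== LEMMAS AND PROOFS =====

-- params of a chunk with the counter starting at n (generalisation of pvParams for the loop invariant)
def pvPf (n : Int) (xs : List String) : String :=
  PySem.Str.join "" ((PySem.List.enumerate xs n).map
    (fun it => "&t" ++ PySem.Int.toStr it.1 ++ "=" ++ it.2))

theorem pvParams_eq (xs : List String) : pvParams xs = pvPf 1 xs := rfl

theorem pvJoin_empty_cons (s : String) (rest : List String) :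
    PySem.Str.join "" (s :: rest) = s ++ PySem.Str.join "" rest := by
  cases rest with
  | nil => simp [PySem.Str.join, PySem.Chars.join_singleton]
  | cons b bs => simp [PySem.Str.join, PySem.Chars.join_cons_cons]

theorem pvPf_nil (n : Int) : pvPf n [] = "" := by
  simp [pvPf, PySem.List.enumerate_nil, PySem.Str.join]

theorem pvPf_cons (n : Int) (x : String) (xs : List String) :
    pvPf n (x :: xs) = ("&t" ++ PySem.Int.toStr n ++ "=" ++ x) ++ pvPf (n+1) xs := by
  simp only [pvPf, PySem.List.enumerate_cons, List.map_cons, pvJoin_empty_cons]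

theorem pvPf_snoc (ys : List String) : ∀ (n : Int) (z : String),
    pvPf n (ys ++ [z]) = pvPf n ys ++ ("&t" ++ PySem.Int.toStr (n + ys.length) ++ "=" ++ z) := by
  induction ys with
  | nil =>
    intro n z
    simp [pvPf_cons, pvPf_nil, String.append_assoc]
  | cons y ys ih =>
    intro n z
    simp only [List.cons_append, pvPf_cons, ih, List.length_cons, String.append_assoc]
    congr 3
    push_cast
    ring_nf

-- A's loop over fewer tags than the remaining room just accumulates params
theorem pvFoldA_small (xs : List String) : ∀ (k : Int) (p : String) (us : List String),
    k + xs.length ≤ 119 →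
    List.foldl pvStepA (p, k, us) xs = (p ++ pvPf (k+1) xs, k + xs.length, us) := by
  induction xs with
  | nil =>
    intro k p us _
    simp [pvPf_nil]
  | cons x xs ih =>
    intro k p us hk
    simp only [List.length_cons] at hk
    have hlt : ¬ (120 ≤ k + 1) := by
      have : (0:Int) ≤ xs.length := by positivity
      omega
    have hstep : pvStepA (p, k, us) x =
        (p ++ "&t" ++ PySem.Int.toStr (k+1) ++ "=" ++ x, k + 1, us) := by
      simp [pvStepA, hlt]
    rw [List.foldl_cons, hstep, ih (k+1) _ us (by push_cast at hk ⊢; omega)]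
    rw [pvPf_cons]
    simp only [Prod.mk.injEq, List.length_cons]
    refine ⟨by simp [String.append_assoc], by push_cast; ring, trivial⟩

-- a full chunk of 120 flushes exactly one URI and resets the state
theorem pvFoldA_chunk (chunk : List String) (us : List String) (h : chunk.length = 120) :
    List.foldl pvStepA ("", 0, us) chunk =
      ("", 0, us ++ ["/cgi/readTags?client=OrcaTouch1172&n=120" ++ pvParams chunk]) := by
  rw [pvParams_eq]
  have hne : chunk ≠ [] := by intro hc; simp [hc] at h
  obtain ⟨ys, z, rfl⟩ : ∃ ys z, chunk = ys ++ [z] :=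
    ⟨_, _, (List.dropLast_append_getLast hne).symm⟩
  have hys : ys.length = 119 := by simpa using h
  rw [List.foldl_append, pvFoldA_small ys 0 "" us (by rw [hys]; norm_num), hys]
  simp only [List.foldl_cons, List.foldl_nil, pvStepA]
  norm_num
  rw [pvPf_snoc, hys]
  have h1 : ((1:Int) + ((119:Nat):Int)) = 120 := by norm_num
  rw [h1]
  have hlit : ("/cgi/readTags?client=OrcaTouch1172&n=" ++ PySem.Int.toStr 120 : String)
      = "/cgi/readTags?client=OrcaTouch1172&n=120" := by decide
  rw [← hlit]
  simp [String.append_assoc]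

theorem pvMain (n : Nat) : ∀ (xs us : List String), xs.length ≤ n →
    (let st := List.foldl pvStepA ("", 0, us) xs
     st.2.2 ++ ["/cgi/readTags?client=OrcaTouch1172&n=" ++ PySem.Int.toStr st.2.1 ++ st.1]) =
    pvGo xs us := by
  induction n with
  | zero =>
    intro xs us hlen
    have hx : xs = [] := List.eq_nil_of_length_eq_zero (Nat.le_zero.mp hlen)
    subst hx
    rw [pvGo]
    simp [pvParams_eq, pvPf_nil]
  | succ n ih =>
    intro xs us hlen
    by_cases h : 120 ≤ xs.length
    · have htake : (xs.take 120).length = 120 := by simp [h]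
      have hfold : List.foldl pvStepA ("", 0, us) xs =
          List.foldl pvStepA ("", 0,
            us ++ ["/cgi/readTags?client=OrcaTouch1172&n=120" ++ pvParams (xs.take 120)])
            (xs.drop 120) := by
        conv_lhs => rw [← List.take_append_drop 120 xs]
        rw [List.foldl_append, pvFoldA_chunk _ _ htake]
      have hdrop : (xs.drop 120).length ≤ n := by
        simp only [List.length_drop]; omega
      simp only [hfold]
      rw [ih (xs.drop 120) _ hdrop]
      conv_rhs => rw [pvGo]
      rw [dif_pos h, PySem.List.slice_from xs (a := 120) (by norm_num),
          PySem.List.slice_to xs (b := 120) (by norm_num)]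
      rfl
    · rw [pvFoldA_small xs 0 "" us (by omega)]
      rw [pvGo, dif_neg h]
      simp [pvParams_eq]

-- ===== VERDICT (by name: the statement is the Claim_ definition above) =====
theorem generate_uri_spec : Claim_equal_generate_uri := by
  intro tags _
  unfold Spec_generate_uri generate_uri generate_uri_alt
  exact pvMain tags.length tags [] le_rfl
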